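-- pv_equiv track=rewrite | github.com/rouyang2017/SISSO | utilities/VarSelect.py | descriptor_2_features
-- ===== SOURCE A (Python) =====
-- def descriptor_2_features(descriptor, all_features,maths_operators):
-- # Identify the primary features in a descriptor formula
--     import copy
--
--     brace = []
--     brace_position = []
--     for i in range(len(descriptor)):
--         if descriptor[i] == '(':
--             brace.append(0)
--             brace_position.append(i)
--         if descriptor[i] == ")":
--             brace.append(1)
--             brace_position.append(i)
--
--     features = []
--
--     while brace:
--         for i in range(len(brace)):
--             if (brace[i] == 0) and (brace[i + 1] == 1):
--                 features.append(descriptor[brace_position[i] + 1:brace_position[i + 1]])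
--                 # if features[-1].startswith('('):
--                 #     del features[-1]
--
--                 del brace[i:i + 2]
--                 del brace_position[i:i + 2]
--                 break
--
--     features_new = []
--     for feature in features:
--         features_new.append(feature)
--
--     for Feature in features:
--         maths_operator_position = []
--         maths_operator_length = []
--         for i in range(len(Feature)):
--             for operator in maths_operators:
--                 op_len = len(operator)
--                 if Feature[i:i + op_len] == operator:
--                     maths_operator_position.append(i)
--                     maths_operator_length.append(op_len)
--                     break
--         Feature_cp = copy.copy(Feature)
--         count = 0
--         count_max = len(copy.copy(maths_operator_position))
--         while count < count_max:
--
--             for j in range(len(maths_operator_position)):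
--                 features_new.append(Feature_cp[:maths_operator_position[j]])
--                 features_new.append(Feature_cp[maths_operator_position[j] + maths_operator_length[j]:])
--
--             maths_operator_length_0 = maths_operator_length[:1][0] + maths_operator_position[:1][0]
--             Feature_cp = Feature_cp[maths_operator_length_0:]
--             del maths_operator_length[:1]
--             del maths_operator_position[:1]
--             for j in range(len(maths_operator_position)):
--                 maths_operator_position[j] = maths_operator_position[j] - maths_operator_length_0
--
--             count += 1
--
--     features_out = []
--     for i in features_new:
--         if (i not in features_out) & (i in all_features):
--             features_out.append(i)
--
--     return features_out
-- ===== SOURCE B (Python) =====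
-- def descriptor_2_features(descriptor, all_features, maths_operators):
--     # Identify the primary features in a descriptor formula.
--     # Stack-based paren matching (one pass), immutable occurrence list with an
--     # offset instead of repeated list rewriting, and set-based dedup/filtering.
--
--     # innermost-first extraction: each ')' closes the most recent '('
--     features = []
--     stack = []
--     for i, c in enumerate(descriptor):
--         if c == '(':
--             stack.append(i)
--         elif c == ')':
--             features.append(descriptor[stack.pop() + 1:i])
--
--     all_set = set(all_features)
--     seen = set()
--     out = []
--
--     def emit(x):
--         if x in all_set and x not in seen:
--             seen.add(x)
--             out.append(x)
--
--     for f in features: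
--         emit(f)
--
--     for F in features:
--         occ = []  # (position, operator length), absolute, never mutated
--         for i in range(len(F)):
--             op = next((op for op in maths_operators if F[i:i + len(op)] == op), None)
--             if op is not None:
--                 occ.append((i, len(op)))
--         cur = F
--         off = 0  # p - off is p's position in cur's frame
--         for k in range(len(occ)):
--             for (p, l) in occ[k:]:
--                 emit(cur[:p - off])
--                 emit(cur[p - off + l:])
--             p0, l0 = occ[k]
--             cur = cur[p0 - off + l0:]
--             off = p0 + l0
--
--     return out
-- ===== Notes on version B (the rewrite author's own statement) =====
-- stated objective: faster
-- what changed: B replaces A's quadratic repeated scan-and-delete over the bracket list by a one-pass stack scan, A's destructive position-list shifting by offset arithmetic over an immutable occurrence list, and A's quadratic 'not in features_out / in all_features' filter by set-based online filtering.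
import Mathlib
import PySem

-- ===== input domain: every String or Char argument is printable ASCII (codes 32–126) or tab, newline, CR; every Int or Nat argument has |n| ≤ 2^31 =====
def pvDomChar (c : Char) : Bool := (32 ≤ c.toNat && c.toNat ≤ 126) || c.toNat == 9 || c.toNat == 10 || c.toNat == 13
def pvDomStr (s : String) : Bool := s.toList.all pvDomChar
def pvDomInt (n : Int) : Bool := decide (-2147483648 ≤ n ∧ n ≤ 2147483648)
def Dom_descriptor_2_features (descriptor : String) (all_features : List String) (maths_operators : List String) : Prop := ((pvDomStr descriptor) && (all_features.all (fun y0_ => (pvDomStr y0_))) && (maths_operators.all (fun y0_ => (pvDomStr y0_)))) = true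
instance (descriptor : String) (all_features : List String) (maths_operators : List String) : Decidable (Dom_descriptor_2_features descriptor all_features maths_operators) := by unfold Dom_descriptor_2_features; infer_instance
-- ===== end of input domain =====

-- B replaces A's quadratic repeated scan-and-delete over the parenthesis list by a one-pass
-- stack scan, A's destructive position-list rewriting by offset arithmetic on an immutable
-- occurrence list, and A's quadratic final membership filter by set-based online filtering (faster).

-- ===== PORT A =====

-- the 'for i in range(len(descriptor))' loop building brace / brace_position (kept as one list of pairs)
def pvA_brace : Nat → List Char → List (Bool × Nat)
  | _, [] => []
  | i, c :: t =>
    (if c = '(' then [(false, i)] else []) ++ (if c = ')' then [(true, i)] else []) ++ pvA_brace (i + 1) t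

-- the inner 'for i in range(len(brace))' search for the first adjacent open/close pair;
-- none = the Python for-loop finds no pair (IndexError or an endless while-loop, both outside Pre_)
def pvA_findPair : List (Bool × Nat) → Option (Nat × Nat × List (Bool × Nat))
  | [] => none
  | [_] => none
  | (b0, p0) :: (b1, p1) :: t =>
    if b0 = false ∧ b1 = true then some (p0, p1, t)
    else
      match pvA_findPair ((b1, p1) :: t) with
      | some (o, c, rest) => some (o, c, (b0, p0) :: rest)
      | none => none

-- the 'while brace:' loop; the fuel argument (= brace.length at the call) only makes it total:
-- under Pre_ every iteration removes one pair, so the fuel never runs out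
def pvA_loop (s : List Char) : Nat → List (Bool × Nat) → List (List Char)
  | _, [] => []
  | 0, _ => []
  | fuel + 1, br =>
    match pvA_findPair br with
    | some (o, c, rest) =>
      PySem.List.slice s (some ((o + 1 : Nat) : Int)) (some ((c : Nat) : Int)) :: pvA_loop s fuel rest
    | none => []

-- 'for operator in maths_operators: if Feature[i:i+op_len] == operator: … break'
def pvA_opAt (F : List Char) (i : Nat) : List (List Char) → Option Nat
  | [] => none
  | op :: t =>
    if PySem.List.slice F (some (i : Int)) (some ((i + op.length : Nat) : Int)) == op then some op.length
    else pvA_opAt F i t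

-- the 'for i in range(len(Feature))' loop collecting maths_operator_position / maths_operator_length
def pvA_occ (F : List Char) (ops : List (List Char)) : List (Int × Int) :=
  (List.range F.length).foldl (fun acc i =>
    match pvA_opAt F i ops with
    | some l => acc ++ [(((i : Nat) : Int), ((l : Nat) : Int))]
    | none => acc) []

-- the 'while count < count_max:' loop (one head deletion per round ⇒ recursion on the position list)
def pvA_expand : List (List Char) → List Char → List (Int × Int) → List (List Char)
  | acc, _, [] => acc
  | acc, Fcp, (p0, l0) :: t =>
    let acc' := ((p0, l0) :: t).foldl
      (fun a q => a ++ [PySem.List.slice Fcp none (some q.1)] ++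
                  [PySem.List.slice Fcp (some (q.1 + q.2)) none]) acc
    pvA_expand acc' (PySem.List.slice Fcp (some (l0 + p0)) none)
      (t.map (fun q => (q.1 - (l0 + p0), q.2)))
termination_by _ _ l => l.length
decreasing_by simp

def descriptor_2_features (descriptor : String) (all_features : List String) (maths_operators : List String) : List String :=
  let s := descriptor.toList
  let afL := all_features.map String.toList
  let opsL := maths_operators.map String.toList
  let br := pvA_brace 0 s
  let features := pvA_loop s br.length br
  let featuresNew := features.foldl (fun a f => a ++ [f]) []
  let featuresNew2 := features.foldl (fun a F => pvA_expand a F (pvA_occ F opsL)) featuresNew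
  let out := featuresNew2.foldl
    (fun a x => if (!(a.contains x)) && afL.contains x then a ++ [x] else a) []
  out.map String.ofList

-- ===== PORT B =====

-- one-pass stack scan: each ')' closes the most recent '(' ('[] => []': Source B raises IndexError there, outside Pre_)
def pvB_scan (s : List Char) : Nat → List Char → List Nat → List (List Char)
  | _, [], _ => []
  | i, c :: t, st =>
    if c = '(' then pvB_scan s (i + 1) t (i :: st)
    else if c = ')' then
      match st with
      | j :: st' =>
        PySem.List.slice s (some ((j + 1 : Nat) : Int)) (some ((i : Nat) : Int)) :: pvB_scan s (i + 1) t st'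
      | [] => []
    else pvB_scan s (i + 1) t st

-- Source B's emit(): online set-based dedup + membership filter; state = (out, seen)
def pvB_emit (afSet : PySem.Set (List Char)) (st : List (List Char) × PySem.Set (List Char))
    (x : List Char) : List (List Char) × PySem.Set (List Char) :=
  if afSet.contains x && !(st.2.contains x) then (st.1 ++ [x], st.2.add x) else st

-- Source B's occ loop: the first operator matching at i (next(… find …)), kept with its length
def pvB_occ (F : List Char) (ops : List (List Char)) : List (Nat × Nat) :=
  (List.range F.length).foldl (fun (acc : List (Nat × Nat)) (i : Nat) =>
    match ops.find? (fun op => PySem.List.slice F (some (i : Int)) (some ((i + op.length : Nat) : Int)) == op) with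
    | some op => acc ++ [(i, op.length)]
    | none => acc) []

-- Source B's 'for k in range(len(occ))' loop: immutable occ, offset arithmetic, online emission
def pvB_expand (afSet : PySem.Set (List Char)) :
    List (List Char) × PySem.Set (List Char) → List Char → Int → List (Nat × Nat) →
    List (List Char) × PySem.Set (List Char)
  | st, _, _, [] => st
  | st, cur, off, (p0, l0) :: t =>
    let st' := ((p0, l0) :: t).foldl (fun a q =>
      pvB_emit afSet (pvB_emit afSet a (PySem.List.slice cur none (some ((q.1 : Int) - off))))
        (PySem.List.slice cur (some ((q.1 : Int) - off + (q.2 : Int))) none)) st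
    pvB_expand afSet st' (PySem.List.slice cur (some ((p0 : Int) - off + (l0 : Int))) none)
      ((p0 : Int) + (l0 : Int)) t

def descriptor_2_features_alt (descriptor : String) (all_features : List String) (maths_operators : List String) : List String :=
  let s := descriptor.toList
  let afSet : PySem.Set (List Char) := PySem.Set.ofList (all_features.map String.toList)
  let opsL := maths_operators.map String.toList
  let feats := pvB_scan s 0 s []
  let st1 := feats.foldl (pvB_emit afSet) ([], PySem.Set.empty)
  let st2 := feats.foldl (fun st F => pvB_expand afSet st F 0 (pvB_occ F opsL)) st1
  st2.1.map String.ofList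

-- ===== PRECONDITION & SPEC =====

-- standard balanced-parentheses counter: d pending '(' , never closing below 0, ending at 0
def pvBalFrom : Nat → List Char → Bool
  | d, [] => d == 0
  | d, c :: t =>
    if c = '(' then pvBalFrom (d + 1) t
    else if c = ')' then (decide (d ≠ 0)) && pvBalFrom (d - 1) t
    else pvBalFrom d t

-- Pre_ excludes exactly the descriptors whose parentheses are unbalanced: there Python A never
-- returns (IndexError from brace[i+1] / an endless 'while brace:' loop).
def Pre_descriptor_2_features (descriptor : String) (all_features : List String) (maths_operators : List String) : Prop :=
  pvBalFrom 0 descriptor.toList = true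
instance (descriptor : String) (all_features : List String) (maths_operators : List String) : Decidable (Pre_descriptor_2_features descriptor all_features maths_operators) := by unfold Pre_descriptor_2_features; infer_instance

def pvWitness_descriptor_2_features : String × List String × List String :=
  ("(a+b)*(c)", ["a", "b", "c", "a+b"], ["+", "*"])

def Spec_descriptor_2_features (descriptor : String) (all_features : List String) (maths_operators : List String) (out : List String) : Prop := out = descriptor_2_features_alt descriptor all_features maths_operators
instance (descriptor : String) (all_features : List String) (maths_operators : List String) (out : List String) : Decidable (Spec_descriptor_2_features descriptor all_features maths_operators out) := by unfold Spec_descriptor_2_features; infer_instance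

-- ===== CLAIM (what is proved, stated in full; the proofs are below) =====
def Claim_equal_descriptor_2_features : Prop := ∀ (descriptor : String) (all_features : List String) (maths_operators : List String), Dom_descriptor_2_features descriptor all_features maths_operators → Pre_descriptor_2_features descriptor all_features maths_operators → Spec_descriptor_2_features descriptor all_features maths_operators (descriptor_2_features descriptor all_features maths_operators)

-- ===== LEMMAS AND PROOFS =====

-- ghost sequence of the candidate substrings A's expansion loop appends (A's frame)
def gExpA : List Char → List (Int × Int) → List (List Char)
  | _, [] => []
  | Fcp, (p0, l0) :: t =>
    ((p0, l0) :: t).flatMap (fun q =>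
      [PySem.List.slice Fcp none (some q.1), PySem.List.slice Fcp (some (q.1 + q.2)) none])
    ++ gExpA (PySem.List.slice Fcp (some (l0 + p0)) none) (t.map (fun q => (q.1 - (l0 + p0), q.2)))
termination_by _ l => l.length
decreasing_by simp

-- the same sequence in B's frame (absolute positions, offset off)
def gExpB : List Char → Int → List (Nat × Nat) → List (List Char)
  | _, _, [] => []
  | cur, off, (p0, l0) :: t =>
    ((p0, l0) :: t).flatMap (fun q =>
      [PySem.List.slice cur none (some ((q.1 : Int) - off)),
       PySem.List.slice cur (some ((q.1 : Int) - off + (q.2 : Int))) none])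
    ++ gExpB (PySem.List.slice cur (some ((p0 : Int) - off + (l0 : Int))) none) ((p0 : Int) + (l0 : Int)) t

lemma foldl_append_pair {α β : Type} (g h : α → β) (l : List α) (acc : List β) :
    l.foldl (fun a q => a ++ [g q] ++ [h q]) acc = acc ++ l.flatMap (fun q => [g q, h q]) := by
  induction l generalizing acc with
  | nil => simp
  | cons q t ih => simp [List.flatMap_def]

lemma pvA_expand_eq (n : Nat) : ∀ (mop : List (Int × Int)), mop.length ≤ n →
    ∀ (acc : List (List Char)) (Fcp : List Char),
    pvA_expand acc Fcp mop = acc ++ gExpA Fcp mop := by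
  induction n with
  | zero =>
    intro mop h acc Fcp
    cases mop with
    | nil => simp [pvA_expand, gExpA]
    | cons q t => simp at h
  | succ n ih =>
    intro mop h acc Fcp
    cases mop with
    | nil => simp [pvA_expand, gExpA]
    | cons q t =>
      obtain ⟨p0, l0⟩ := q
      rw [pvA_expand, gExpA]
      simp only [foldl_append_pair]
      rw [ih _ (by simp at h ⊢; omega)]
      simp [List.append_assoc]

lemma foldl_emit_pair {α β γ : Type} (f : β → γ → β) (g h : α → γ) (l : List α) (b : β) :
    l.foldl (fun a q => f (f a (g q)) (h q)) b = (l.flatMap (fun q => [g q, h q])).foldl f b := by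
  induction l generalizing b with
  | nil => rfl
  | cons q t ih => simp [List.flatMap_cons, ih]

lemma pvB_expand_eq (afSet : PySem.Set (List Char)) (occ : List (Nat × Nat)) :
    ∀ (st : List (List Char) × PySem.Set (List Char)) (cur : List Char) (off : Int),
    pvB_expand afSet st cur off occ = (gExpB cur off occ).foldl (pvB_emit afSet) st := by
  induction hn : occ.length using Nat.strong_induction_on generalizing occ with
  | _ n ih =>
    intro st cur off
    cases occ with
    | nil => simp [pvB_expand, gExpB]
    | cons q t =>
      obtain ⟨p0, l0⟩ := q
      rw [pvB_expand, gExpB]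
      simp only [foldl_emit_pair]
      rw [List.foldl_append]
      subst hn
      rw [ih t.length (by simp) t rfl]

lemma opAt_eq_find (F : List Char) (i : Nat) (ops : List (List Char)) :
    pvA_opAt F i ops = (ops.find? (fun op =>
      PySem.List.slice F (some (i : Int)) (some ((i + op.length : Nat) : Int)) == op)).map List.length := by
  induction ops with
  | nil => rfl
  | cons op t ih =>
    rw [pvA_opAt, List.find?_cons]
    cases hb : (PySem.List.slice F (some (i : Int)) (some ((i + op.length : Nat) : Int)) == op) with
    | true => simp
    | false => simp at hb; simp [ih]

lemma occ_eq (F : List Char) (ops : List (List Char)) :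
    pvA_occ F ops = (pvB_occ F ops).map (fun q => (((q.1 : Nat) : Int), ((q.2 : Nat) : Int))) := by
  have key : ∀ (l : List Nat) (accB : List (Nat × Nat)),
      l.foldl (fun acc i =>
        match pvA_opAt F i ops with
        | some L => acc ++ [(((i : Nat) : Int), ((L : Nat) : Int))]
        | none => acc) (accB.map (fun q => (((q.1 : Nat) : Int), ((q.2 : Nat) : Int)))) =
      (l.foldl (fun (acc : List (Nat × Nat)) (i : Nat) =>
        match ops.find? (fun op => PySem.List.slice F (some (i : Int)) (some ((i + op.length : Nat) : Int)) == op) with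
        | some op => acc ++ [(i, op.length)]
        | none => acc) accB).map (fun q => (((q.1 : Nat) : Int), ((q.2 : Nat) : Int))) := by
    intro l
    induction l with
    | nil => intro accB; rfl
    | cons i t ih =>
      intro accB
      simp only [List.foldl_cons, opAt_eq_find F i ops]
      cases h : ops.find? (fun op =>
          PySem.List.slice F (some (i : Int)) (some ((i + op.length : Nat) : Int)) == op) with
      | none => simp only [Option.map_none]; exact ih accB
      | some op =>
        simp only [Option.map_some]
        have hmap : (accB.map (fun q => (((q.1 : Nat) : Int), ((q.2 : Nat) : Int)))) ++
            [(((i : Nat) : Int), ((op.length : Nat) : Int))]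
            = (accB ++ [(i, op.length)]).map (fun q => (((q.1 : Nat) : Int), ((q.2 : Nat) : Int))) := by simp
        rw [hmap, ih]
  simpa only [pvA_occ, pvB_occ, List.map_nil] using key (List.range F.length) []

lemma gExp_shift (t : List (Nat × Nat)) : ∀ (cur : List Char) (off : Int),
    gExpA cur (t.map (fun q => ((q.1 : Int) - off, (q.2 : Int)))) = gExpB cur off t := by
  induction hn : t.length using Nat.strong_induction_on generalizing t with
  | _ n ih =>
    intro cur off
    cases t with
    | nil => simp [gExpA, gExpB]
    | cons q0 t =>
      obtain ⟨p0, l0⟩ := q0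
      rw [List.map_cons, gExpA, gExpB]
      congr 1
      · change List.flatMap _ (List.map (fun q : Nat × Nat => ((q.1 : Int) - off, (q.2 : Int))) ((p0, l0) :: t)) = _
        rw [List.flatMap_map]
      · have e1 : (l0 : Int) + ((p0 : Int) - off) = (p0 : Int) - off + (l0 : Int) := by ring
        rw [e1, List.map_map]
        have e2 : ((fun q : Int × Int => (q.1 - ((p0 : Int) - off + (l0 : Int)), q.2)) ∘
            (fun q : Nat × Nat => ((q.1 : Int) - off, (q.2 : Int)))) =
            (fun q : Nat × Nat => ((q.1 : Int) - ((p0 : Int) + (l0 : Int)), (q.2 : Int))) := by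
          funext q
          show ((q.1 : Int) - off - ((p0 : Int) - off + (l0 : Int)), ((q.2 : Nat) : Int)) =
            ((q.1 : Int) - ((p0 : Int) + (l0 : Int)), ((q.2 : Nat) : Int))
          have harith : (q.1 : Int) - off - ((p0 : Int) - off + (l0 : Int)) =
              (q.1 : Int) - ((p0 : Int) + (l0 : Int)) := by ring
          rw [harith]
        rw [e2]
        subst hn
        exact ih t.length (by simp) t rfl _ _

lemma findPair_zeros (zs : List (Bool × Nat)) (j p : Nat) (rest : List (Bool × Nat)) :
    (∀ q ∈ zs, q.1 = false) →
    pvA_findPair (zs ++ (false, j) :: (true, p) :: rest) = some (j, p, zs ++ rest) := by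
  induction zs with
  | nil => intro _; simp [pvA_findPair]
  | cons z zs ih =>
    intro hz
    obtain ⟨b, z1⟩ := z
    have hb : b = false := hz (b, z1) (by simp)
    subst hb
    have htl : ∀ q ∈ zs, q.1 = false := fun q hq => hz q (by simp [hq])
    cases zs with
    | nil =>
      simp [pvA_findPair]
    | cons z2 zs2 =>
      obtain ⟨b2, z3⟩ := z2
      have hb2 : b2 = false := htl (b2, z3) (by simp)
      subst hb2
      simp only [List.cons_append]
      rw [pvA_findPair]
      simp only [List.cons_append] at ih
      rw [ih htl]
      simp

lemma pvB_scan_cons (s : List Char) (i : Nat) (c : Char) (t : List Char) (st : List Nat) :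
    pvB_scan s i (c :: t) st =
      if c = '(' then pvB_scan s (i + 1) t (i :: st)
      else if c = ')' then
        (match st with
        | j :: st' =>
          PySem.List.slice s (some ((j + 1 : Nat) : Int)) (some ((i : Nat) : Int)) :: pvB_scan s (i + 1) t st'
        | [] => [])
      else pvB_scan s (i + 1) t st := by
  cases st with
  | nil => rw [pvB_scan.eq_3]
  | cons j st' => rw [pvB_scan.eq_2]

lemma scan_eq (s : List Char) (t : List Char) : ∀ (i : Nat) (st : List Nat) (fuel : Nat),
    pvBalFrom st.length t = true →
    (st.reverse.map (fun j => ((false : Bool), j)) ++ pvA_brace i t).length ≤ fuel →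
    pvA_loop s fuel (st.reverse.map (fun j => ((false : Bool), j)) ++ pvA_brace i t) = pvB_scan s i t st := by
  induction t with
  | nil =>
    intro i st fuel hbal _
    rw [pvBalFrom] at hbal
    have hst : st = [] := List.length_eq_zero_iff.mp (by simpa using hbal)
    subst hst
    simp [pvA_brace, pvA_loop, pvB_scan]
  | cons c t ih =>
    intro i st fuel hbal hfuel
    by_cases hc : c = '('
    · rw [pvA_brace, if_pos hc, if_neg (by simp [hc])] at hfuel ⊢
      rw [pvBalFrom, if_pos hc] at hbal
      rw [pvB_scan_cons, if_pos hc]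
      have hih := ih (i + 1) (i :: st) fuel (by simpa using hbal)
      simp only [List.reverse_cons, List.map_append, List.map_cons, List.map_nil,
        List.append_assoc, List.singleton_append] at hih hfuel ⊢
      exact hih hfuel
    · by_cases hc2 : c = ')'
      · rw [pvA_brace, if_neg hc, if_pos hc2] at hfuel ⊢
        rw [pvBalFrom, if_neg hc, if_pos hc2] at hbal
        simp only [Bool.and_eq_true, decide_eq_true_eq] at hbal
        obtain ⟨hne, hbal'⟩ := hbal
        cases st with
        | nil => simp at hne
        | cons jj st' =>
          rw [pvB_scan_cons, if_neg hc, if_pos hc2]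
          simp only [List.reverse_cons, List.map_append, List.map_cons, List.map_nil,
            List.append_assoc, List.nil_append, List.cons_append] at hfuel ⊢
          have hzf : ∀ q ∈ st'.reverse.map (fun j => ((false : Bool), j)), q.1 = false := by
            intro q hq
            simp only [List.mem_map] at hq
            obtain ⟨a, _, rfl⟩ := hq
            rfl
          obtain ⟨fuel', rfl⟩ : ∃ fuel', fuel = fuel' + 1 := by
            refine ⟨fuel - 1, ?_⟩
            simp only [List.length_append, List.length_map, List.length_reverse,
              List.length_cons] at hfuel
            omega
          obtain ⟨hd, tl, hL⟩ : ∃ hd tl,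
              st'.reverse.map (fun j => ((false : Bool), j)) ++ (false, jj) :: (true, i) :: pvA_brace (i + 1) t = hd :: tl := by
            cases h : st'.reverse.map (fun j => ((false : Bool), j)) with
            | nil => exact ⟨(false, jj), (true, i) :: pvA_brace (i + 1) t, by simp⟩
            | cons a b => exact ⟨a, b ++ (false, jj) :: (true, i) :: pvA_brace (i + 1) t, by simp⟩
          rw [hL, pvA_loop, ← hL, findPair_zeros _ _ _ _ hzf]
          dsimp only
          have hb2 : pvBalFrom st'.length t = true := by
            simpa using hbal'
          have hih := ih (i + 1) st' fuel' hb2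
          have hfe : (st'.reverse.map (fun j => ((false : Bool), j)) ++ pvA_brace (i + 1) t).length ≤ fuel' := by
            simp only [List.length_append, List.length_map, List.length_reverse,
              List.length_cons] at hfuel ⊢
            omega
          rw [hih hfe]
          simp
      · rw [pvA_brace, if_neg hc, if_neg hc2] at hfuel ⊢
        rw [pvBalFrom, if_neg hc, if_neg hc2] at hbal
        rw [pvB_scan_cons, if_neg hc, if_neg hc2]
        simp only [List.nil_append] at hfuel ⊢
        exact ih (i + 1) st fuel hbal hfuel

lemma emit_fold_eq (afL : List (List Char)) (cs : List (List Char)) : ∀ (acc : List (List Char)),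
    cs.foldl (pvB_emit (PySem.Set.ofList afL)) (acc, (acc : PySem.Set (List Char))) =
      (cs.foldl (fun a x => if (!(a.contains x)) && afL.contains x then a ++ [x] else a) acc,
       cs.foldl (fun a x => if (!(a.contains x)) && afL.contains x then a ++ [x] else a) acc) := by
  induction cs with
  | nil => intro acc; rfl
  | cons x cs ih =>
    intro acc
    have hstep : pvB_emit (PySem.Set.ofList afL) (acc, (acc : PySem.Set (List Char))) x =
        (if (!(acc.contains x)) && afL.contains x then acc ++ [x] else acc,
         (if (!(acc.contains x)) && afL.contains x then acc ++ [x] else acc : PySem.Set (List Char))) := by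
      by_cases hx : acc.contains x = true
      · have hx' : x ∈ acc := by simpa using hx
        simp [pvB_emit, PySem.Set.contains, hx']
      · by_cases ha : afL.contains x = true
        · have hx' : x ∉ acc := by simpa using hx
          have ha' : x ∈ afL := by simpa using ha
          simp [pvB_emit, PySem.Set.contains, PySem.Set.add, hx', ha']
        · have ha' : x ∉ afL := by simpa using ha
          simp [pvB_emit, PySem.Set.contains, ha']
    simp only [List.foldl_cons, hstep]
    split
    · exact ih (acc ++ [x])
    · exact ih acc

lemma ports_agree (descriptor : String) (all_features : List String) (maths_operators : List String)
    (hpre : pvBalFrom 0 descriptor.toList = true) :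
    descriptor_2_features descriptor all_features maths_operators =
      descriptor_2_features_alt descriptor all_features maths_operators := by
  simp only [descriptor_2_features, descriptor_2_features_alt]
  set s := descriptor.toList with hs
  set afL := all_features.map String.toList with hafL
  set opsL := maths_operators.map String.toList with hopsL
  -- the two paren extractions agree
  have hfeats : pvA_loop s (pvA_brace 0 s).length (pvA_brace 0 s) = pvB_scan s 0 s [] := by
    have := scan_eq s s 0 [] (pvA_brace 0 s).length (by simpa using hpre) (by simp)
    simpa using this
  set feats := pvB_scan s 0 s [] with hfdef
  rw [hfeats]
  -- A side: features_new is the plain candidate list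
  rw [PySem.List.foldl_append_singleton_eq_self feats ([] : List (List Char)), List.nil_append]
  rw [PySem.List.foldl_congr_mem feats _ (fun a F => a ++ gExpA F (pvA_occ F opsL)) feats
    (fun acc x _ => pvA_expand_eq (pvA_occ x opsL).length (pvA_occ x opsL) le_rfl acc x)]
  rw [PySem.List.foldl_append_eq_flatMap (fun F => gExpA F (pvA_occ F opsL)) feats feats]
  -- B side: the expansion loop is one emit-fold over the generated candidates
  rw [PySem.List.foldl_congr_mem feats _
    (fun st F => (gExpB F 0 (pvB_occ F opsL)).foldl (pvB_emit (PySem.Set.ofList afL)) st) _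
    (fun acc x _ => pvB_expand_eq (PySem.Set.ofList afL) (pvB_occ x opsL) acc x 0)]
  rw [← List.foldl_flatMap]
  have hinit : (([] : List (List Char)), (PySem.Set.empty : PySem.Set (List Char)))
      = (([] : List (List Char)), (([] : List (List Char)) : PySem.Set (List Char))) := rfl
  rw [hinit, ← List.foldl_append]
  -- per-feature candidate sequences agree
  have hseq : ∀ F : List Char, gExpA F (pvA_occ F opsL) = gExpB F 0 (pvB_occ F opsL) := by
    intro F
    rw [occ_eq]
    have hmap : (pvB_occ F opsL).map (fun q => (((q.1 : Nat) : Int), ((q.2 : Nat) : Int)))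
        = (pvB_occ F opsL).map (fun q => ((q.1 : Int) - (0 : Int), ((q.2 : Nat) : Int))) := by
      simp
    rw [hmap, gExp_shift]
  have hflat : feats.flatMap (fun F => gExpA F (pvA_occ F opsL))
      = feats.flatMap (fun F => gExpB F 0 (pvB_occ F opsL)) := by
    apply List.flatMap_congr
    intro x _
    exact hseq x
  rw [hflat]
  rw [emit_fold_eq afL (feats ++ feats.flatMap fun F => gExpB F 0 (pvB_occ F opsL)) []]

-- ===== VERDICT (by name: the statement is the Claim_ definition above) =====
theorem descriptor_2_features_spec : Claim_equal_descriptor_2_features := by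
  intro descriptor all_features maths_operators _hdom hpre
  unfold Spec_descriptor_2_features
  exact ports_agree descriptor all_features maths_operators hpre
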